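-- pv_equiv track=rewrite | github.com/alright212/ITI0102_2022 | TK/tk3/exam.py | mirror_ends
-- ===== SOURCE A (Python) =====
-- def mirror_ends(s: str) -> str:
--     """
--     Given a string, look for a mirror image (backwards) string at both the beginning and end of the given string.
--
--     In other words, zero or more characters at the very beginning of the given string,
--     and at the very end of the string in reverse order (possibly overlapping).
--
--     For example, the string "abXYZba" has the mirror end "ab".
--
--     mirrorEnds("abXYZba") → "ab"
--     mirrorEnds("abca") → "a"
--     mirrorEnds("aba") → "aba"
--
--     :param s: String
--     :return: Mirror image string
--     """
--     # Create an empty string.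
--     mirror = ""
--     # Iterate through the string.
--     for i in range(len(s)):
--         # If the character at index i is the same as the character at index len(s) - 1 - i, then add that character to out.
--         if s[i] == s[len(s) - 1 - i]:
--             mirror += s[i]
--         # If the character at index i is not the same as the character at index len(s) - 1 - i, then return the mirror string.
--         else:
--             return mirror
--     # Return the mirror string.
--     return mirror
-- ===== SOURCE B (Python) =====
-- def mirror_ends(s: str) -> str:
--     """Binary search for the largest k such that s[:k] == s[::-1][:k].
--
--     The predicate "the first k characters mirror the last k" is monotone in k,
--     so the answer is found by halving instead of a linear scan.
--     """
--     r = s[::-1]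
--     lo, hi = 0, len(s)
--     while lo < hi:
--         mid = (lo + hi + 1) // 2
--         if s[:mid] == r[:mid]:
--             lo = mid
--         else:
--             hi = mid - 1
--     return s[:lo]
-- ===== Notes on version B (the rewrite author's own statement) =====
-- stated objective: alternative
-- what changed: B reframes the task as the largest k with s[:k] == s[::-1][:k], a monotone predicate, and finds it by binary search over k with whole-prefix slice comparisons, instead of A's character-by-character linear scan with string += and early return.
import Mathlib
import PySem

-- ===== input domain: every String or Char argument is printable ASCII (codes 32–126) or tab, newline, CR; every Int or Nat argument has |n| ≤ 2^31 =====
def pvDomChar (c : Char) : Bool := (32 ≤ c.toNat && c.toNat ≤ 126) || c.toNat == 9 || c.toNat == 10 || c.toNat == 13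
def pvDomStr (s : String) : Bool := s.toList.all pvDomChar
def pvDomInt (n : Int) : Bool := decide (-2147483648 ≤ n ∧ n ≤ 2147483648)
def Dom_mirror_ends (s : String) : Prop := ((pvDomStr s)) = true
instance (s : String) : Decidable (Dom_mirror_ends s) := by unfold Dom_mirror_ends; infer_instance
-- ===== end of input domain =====

-- B replaces A's linear scan by a binary search for the largest k with s[:k] == s[::-1][:k] (alternative algorithm; same practical cost).


-- ===== PORT A =====
-- A's for-loop over range(len(s)) with early return, accumulator `mirror`.
def mirrorEndsLoop (l : List Char) (i : Nat) (acc : List Char) : List Char :=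
  if h : i < l.length then
    if l.getD i ' ' == l.getD (l.length - 1 - i) ' ' then
      mirrorEndsLoop l (i + 1) (acc ++ [l.getD i ' '])
    else acc
  else acc
termination_by l.length - i

def mirror_ends (s : String) : String :=
  String.mk (mirrorEndsLoop s.toList 0 [])

-- ===== PORT B =====
-- B's while-loop: binary search on k for the largest k with s[:k] == r[:k], r = reversed s.
def bsLoop (a r : List Char) (lo hi : Nat) : Nat :=
  if h : lo < hi then
    let mid := (lo + hi + 1) / 2
    if a.take mid == r.take mid then bsLoop a r mid hi
    else bsLoop a r lo (mid - 1)
  else lo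
termination_by hi - lo
decreasing_by all_goals omega

def mirror_ends_alt (s : String) : String :=
  String.mk (s.toList.take (bsLoop s.toList s.toList.reverse 0 s.toList.length))

-- ===== PRECONDITION & SPEC =====
def Spec_mirror_ends (s : String) (out : String) : Prop := out = mirror_ends_alt s
instance (s : String) (out : String) : Decidable (Spec_mirror_ends s out) := by unfold Spec_mirror_ends; infer_instance

-- ===== CLAIM (what is proved, stated in full; the proofs are below) =====
def Claim_equal_mirror_ends : Prop := ∀ (s : String), Dom_mirror_ends s → Spec_mirror_ends s (mirror_ends s)

-- ===== LEMMAS AND PROOFS =====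

-- proof-side characterisation of A's result: common prefix built pair by pair
def commonPrefixZip : List Char → List Char → List Char
  | a :: as, b :: bs => if a == b then a :: commonPrefixZip as bs else []
  | _, _ => []

theorem mirrorEndsLoop_eq (l : List Char) (i : Nat) (acc : List Char) :
    mirrorEndsLoop l i acc = acc ++ commonPrefixZip (l.drop i) (l.reverse.drop i) := by
  induction i, acc using mirrorEndsLoop.induct l with
  | case1 i acc h heq ih =>
      rw [mirrorEndsLoop, dif_pos h, if_pos heq, ih]
      have hi : i < l.reverse.length := by simpa using h
      rw [List.drop_eq_getElem_cons h, List.drop_eq_getElem_cons hi]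
      have hr : l.reverse[i] = l[l.length - 1 - i] := by
        rw [List.getElem_reverse]
      have h2 : l.length - 1 - i < l.length := by omega
      have hg1 : l.getD i ' ' = l[i] := List.getD_eq_getElem l ' ' h
      have hg2 : l.getD (l.length - 1 - i) ' ' = l[l.length - 1 - i] :=
        List.getD_eq_getElem l ' ' h2
      simp only [commonPrefixZip, hr]
      rw [if_pos]
      · simp [List.getElem?_eq_getElem h]
      · rw [← hg1, ← hg2]; exact heq
  | case2 i acc h heq =>
      rw [mirrorEndsLoop, dif_pos h, if_neg heq]
      have hi : i < l.reverse.length := by simpa using h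
      rw [List.drop_eq_getElem_cons h, List.drop_eq_getElem_cons hi]
      have hr : l.reverse[i] = l[l.length - 1 - i] := by
        rw [List.getElem_reverse]
      have h2 : l.length - 1 - i < l.length := by omega
      have hg1 : l.getD i ' ' = l[i] := List.getD_eq_getElem l ' ' h
      have hg2 : l.getD (l.length - 1 - i) ' ' = l[l.length - 1 - i] :=
        List.getD_eq_getElem l ' ' h2
      simp only [commonPrefixZip, hr]
      rw [if_neg]
      · simp
      · rw [← hg1, ← hg2]; exact heq
  | case3 i acc h =>
      rw [mirrorEndsLoop, dif_neg h]
      have : l.length ≤ i := by omega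
      rw [List.drop_eq_nil_of_le this, List.drop_eq_nil_of_le (by simpa using this)]
      simp [commonPrefixZip]

-- the key monotone predicate: the first k characters agree
def Agree (a r : List Char) (k : Nat) : Prop := a.take k = r.take k

theorem agree_mono {a r : List Char} {j k : Nat} (hjk : j ≤ k) (h : Agree a r k) :
    Agree a r j := by
  unfold Agree at *
  have := congrArg (List.take j) h
  simpa [List.take_take, Nat.min_eq_left hjk] using this

-- commonPrefixZip's value is characterised as a maximal agreeing prefix
theorem cp_spec (a r : List Char) (hlen : a.length = r.length) :
    commonPrefixZip a r = a.take (commonPrefixZip a r).length ∧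
    Agree a r (commonPrefixZip a r).length ∧
    ((commonPrefixZip a r).length = a.length ∨
      ¬ Agree a r ((commonPrefixZip a r).length + 1)) := by
  induction a generalizing r with
  | nil =>
      simp [commonPrefixZip, Agree]
  | cons x xs ih =>
      cases r with
      | nil => simp at hlen
      | cons y ys =>
          simp only [List.length_cons] at hlen
          by_cases hxy : x = y
          · have := ih ys (by omega)
            obtain ⟨h1, h2, h3⟩ := this
            subst hxy
            simp only [commonPrefixZip, beq_self_eq_true, if_pos, List.length_cons]
            refine ⟨?_, ?_, ?_⟩
            · simp [List.take_succ_cons]; exact h1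
            · unfold Agree at h2 ⊢
              simp [List.take_succ_cons, h2]
            · rcases h3 with h3 | h3
              · left; simp [h3]
              · right; unfold Agree at h3 ⊢
                simp only [List.take_succ_cons]
                intro hc
                exact h3 (by injection hc)
          · have hz : commonPrefixZip (x :: xs) (y :: ys) = [] := by
              simp [commonPrefixZip, hxy]
            rw [hz]
            refine ⟨by simp, by simp [Agree], ?_⟩
            right
            unfold Agree
            simp only [List.length_nil, Nat.zero_add, List.take_succ_cons]
            intro hc
            exact hxy (by injection hc)

-- binary search correctness: the invariant is carried through the halving
theorem bsLoop_spec (a r : List Char) (lo hi : Nat)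
    (hle : lo ≤ hi) (hhi : hi ≤ a.length)
    (hlo : Agree a r lo)
    (hup : hi = a.length ∨ ¬ Agree a r (hi + 1)) :
    Agree a r (bsLoop a r lo hi) ∧ bsLoop a r lo hi ≤ a.length ∧
    (bsLoop a r lo hi = a.length ∨ ¬ Agree a r (bsLoop a r lo hi + 1)) := by
  induction lo, hi using bsLoop.induct a r with
  | case1 lo hi h mid heq ih =>
      rw [bsLoop, dif_pos h, if_pos heq]
      exact ih (by omega) hhi (beq_iff_eq.mp heq) hup
  | case2 lo hi h mid heq ih =>
      rw [bsLoop, dif_pos h, if_neg heq]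
      refine ih (by omega) (by omega) hlo ?_
      right
      have : mid - 1 + 1 = mid := by omega
      rw [this]
      exact fun hc => (by simpa using heq : ¬ Agree a r mid) hc
  | case3 lo hi h =>
      rw [bsLoop, dif_neg h]
      have : lo = hi := by omega
      subst this
      exact ⟨hlo, hhi, hup⟩

-- a maximal agreeing prefix length is unique
theorem max_unique {a r : List Char} {m₁ m₂ : Nat}
    (h₁ : Agree a r m₁) (h₁' : m₁ = a.length ∨ ¬ Agree a r (m₁ + 1)) (hm₁ : m₁ ≤ a.length)
    (h₂ : Agree a r m₂) (h₂' : m₂ = a.length ∨ ¬ Agree a r (m₂ + 1)) (hm₂ : m₂ ≤ a.length) :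
    m₁ = m₂ := by
  by_contra hne
  rcases Nat.lt_or_ge m₁ m₂ with hlt | hge
  · rcases h₁' with h | h
    · omega
    · exact h (agree_mono (by omega) h₂)
  · have hlt : m₂ < m₁ := by omega
    rcases h₂' with h | h
    · omega
    · exact h (agree_mono (by omega) h₁)

-- ===== VERDICT (by name: the statement is the Claim_ definition above) =====
theorem mirror_ends_spec : Claim_equal_mirror_ends := by
  intro s _
  unfold Spec_mirror_ends mirror_ends mirror_ends_alt
  rw [mirrorEndsLoop_eq]
  set a := s.toList
  have hlen : a.length = a.reverse.length := by simp
  obtain ⟨hcp1, hcp2, hcp3⟩ := cp_spec a a.reverse hlen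
  have hcplen : (commonPrefixZip a a.reverse).length ≤ a.length := by
    have := congrArg List.length hcp1
    simp at this
    omega
  obtain ⟨hb1, hb2, hb3⟩ := bsLoop_spec a a.reverse 0 a.length
    (Nat.zero_le _) (le_refl _) (by simp [Agree]) (Or.inl rfl)
  have := max_unique hcp2 hcp3 hcplen hb1 hb3 hb2
  simp only [List.drop_zero]
  rw [hcp1, this]
  simp
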